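-- pv_equiv track=rewrite | github.com/CodeBoarding/CodeBoarding | tests/integration/generate_scaled_javascript_project.py | rewrite_js_name
-- ===== SOURCE A (Python) =====
-- PACKAGES = ["models", "services", "utils", "unused"]
--
-- _width = 2
--
-- def sfx(i: int) -> str:
--     return f"_{i:0{_width}d}"
--
-- def rewrite_js_name(name: str, i: int) -> str:
--     """Rewrite a dotted reference/edge/class name for copy i.
--
--     src.index.main       → src.entry_00.main
--     src.models.base.Entity → src.models_00.base.Entity
--     src.utils.helpers.add  → src.utils_00.helpers.add
--     """
--     s = sfx(i)
--
--     # src.index.xxx → src.entry_XX.xxx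
--     if name.startswith("src.index."):
--         return f"src.entry{s}.{name[len('src.index.'):]}"
--     if name == "src.index":
--         return f"src.entry{s}"
--
--     # src.PACKAGE.xxx → src.PACKAGE_XX.xxx
--     for pkg in PACKAGES:
--         prefix = f"src.{pkg}."
--         if name.startswith(prefix):
--             return f"src.{pkg}{s}.{name[len(prefix):]}"
--         if name == f"src.{pkg}":
--             return f"src.{pkg}{s}"
--
--     return name
-- ===== SOURCE B (Python) =====
-- PACKAGES = ["models", "services", "utils", "unused"]
--
-- _width = 2
--
-- def sfx(i: int) -> str:
--     return f"_{i:0{_width}d}"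
--
-- _PKG_SET = set(PACKAGES)
--
-- def rewrite_js_name(name: str, i: int) -> str:
--     """Split once on '.', dispatch on the second component, rejoin."""
--     parts = name.split('.')
--     if len(parts) < 2 or parts[0] != 'src':
--         return name
--     second = parts[1]
--     if second == 'index':
--         parts[1] = 'entry' + sfx(i)
--     elif second in _PKG_SET:
--         parts[1] = second + sfx(i)
--     return '.'.join(parts)
-- ===== Notes on version B (the rewrite author's own statement) =====
-- stated objective: simpler
-- what changed: B splits the name once on '.' and dispatches on the second path component (index / listed package / other), rejoining the parts, instead of A's chain of startswith/equality prefix scans over the package list.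
import Mathlib
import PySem

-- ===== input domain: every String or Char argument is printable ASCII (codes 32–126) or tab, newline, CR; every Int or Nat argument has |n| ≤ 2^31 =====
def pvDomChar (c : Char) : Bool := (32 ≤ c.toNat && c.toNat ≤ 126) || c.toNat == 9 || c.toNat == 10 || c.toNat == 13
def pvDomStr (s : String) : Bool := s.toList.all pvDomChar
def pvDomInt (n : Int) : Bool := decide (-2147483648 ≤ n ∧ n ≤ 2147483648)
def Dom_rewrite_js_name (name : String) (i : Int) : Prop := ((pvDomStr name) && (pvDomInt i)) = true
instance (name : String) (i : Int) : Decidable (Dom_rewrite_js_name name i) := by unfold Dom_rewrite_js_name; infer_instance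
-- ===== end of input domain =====

-- B splits the name once on '.' and dispatches on the second path segment, instead of A's
-- sequence of prefix/equality scans over the package list; objective: simpler (same cost).


-- ===== PORT A =====
-- module constant PACKAGES
def pvPackages : List (List Char) := ["models".toList, "services".toList, "utils".toList, "unused".toList]

-- module helper sfx(i) = f"_{i:0{_width}d}" with _width = 2; for the 'd' format this is
-- exactly "_" + str(i).zfill(2) (zero padding goes after the sign), ported with PySem
def pvSfx (i : Int) : List Char := '_' :: PySem.Chars.zfill (PySem.Int.toChars i) 2

-- the 'for pkg in PACKAGES' loop with its two early returns;
-- name[len(prefix):] with the nonnegative bound len(prefix) is exactly List.drop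
def pvLoopA (cs s : List Char) : List (List Char) → List Char
  | [] => cs
  | pkg :: rest =>
    if PySem.Chars.startswith cs ("src.".toList ++ pkg ++ ['.']) then
      "src.".toList ++ pkg ++ s ++ ['.'] ++ cs.drop ("src.".toList ++ pkg ++ ['.']).length
    else if cs = "src.".toList ++ pkg then
      "src.".toList ++ pkg ++ s
    else pvLoopA cs s rest

def pvCoreA (cs s : List Char) : List Char :=
  if PySem.Chars.startswith cs "src.index.".toList then
    "src.entry".toList ++ s ++ ['.'] ++ cs.drop "src.index.".toList.length
  else if cs = "src.index".toList then
    "src.entry".toList ++ s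
  else pvLoopA cs s pvPackages

def rewrite_js_name (name : String) (i : Int) : String :=
  String.ofList (pvCoreA name.toList (pvSfx i))

-- ===== PORT B =====
-- _PKG_SET = set(PACKAGES)
def pvPkgSet : PySem.Set (List Char) := PySem.Set.ofList pvPackages

-- dispatch on the parts list produced by name.split('.') (stdlib split, ported as
-- List.splitOn; '.'.join(parts) is PySem.Chars.join)
def pvDispatchB (cs s : List Char) : List (List Char) → List Char
  | first :: second :: rest =>
    if first = "src".toList then
      let second' :=
        if second = "index".toList then "entry".toList ++ s
        else if second ∈ pvPkgSet then second ++ s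
        else second
      PySem.Chars.join ['.'] (first :: second' :: rest)
    else cs
  | _ => cs

def pvCoreB (cs s : List Char) : List Char := pvDispatchB cs s (cs.splitOn '.')

def rewrite_js_name_alt (name : String) (i : Int) : String :=
  String.ofList (pvCoreB name.toList (pvSfx i))

-- ===== PRECONDITION & SPEC =====
def Spec_rewrite_js_name (name : String) (i : Int) (out : String) : Prop := out = rewrite_js_name_alt name i
instance (name : String) (i : Int) (out : String) : Decidable (Spec_rewrite_js_name name i out) := by unfold Spec_rewrite_js_name; infer_instance

-- ===== CLAIM (what is proved, stated in full; the proofs are below) =====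
def Claim_equal_rewrite_js_name : Prop := ∀ (name : String) (i : Int), Dom_rewrite_js_name name i → Spec_rewrite_js_name name i (rewrite_js_name name i)

-- ===== LEMMAS AND PROOFS =====
theorem pv_first_dot_unique {p q t u : List Char} (hp : '.' ∉ p) (hq : '.' ∉ q)
    (h : p ++ '.' :: t = q ++ '.' :: u) : p = q ∧ t = u := by
  induction p generalizing q with
  | nil =>
    cases q with
    | nil => simpa using h
    | cons d q' =>
      simp only [List.nil_append, List.cons_append, List.cons.injEq] at h
      exact absurd (h.1 ▸ List.mem_cons_self) hq
  | cons c p' ih =>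
    cases q with
    | nil =>
      simp only [List.nil_append, List.cons_append, List.cons.injEq] at h
      exact absurd (h.1.symm ▸ List.mem_cons_self) hp
    | cons d q' =>
      simp only [List.cons_append, List.cons.injEq] at h
      obtain ⟨rfl, h2⟩ := h
      have := ih (fun hx => hp (List.mem_cons_of_mem _ hx))
        (fun hx => hq (List.mem_cons_of_mem _ hx)) h2
      exact ⟨by rw [this.1], this.2⟩

theorem pv_dot_prefix {q w u w2 : List Char} (hq : '.' ∉ q) (hw : '.' ∉ w)
    (h : (w ++ '.' :: w2) <+: (q ++ '.' :: u)) : w = q ∧ w2 <+: u := by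
  obtain ⟨v, hv⟩ := h
  rw [List.append_assoc, List.cons_append] at hv
  obtain ⟨h1, h2⟩ := pv_first_dot_unique hw hq hv
  exact ⟨h1, ⟨v, h2⟩⟩

theorem pv_exists_first_dot {cs : List Char} (h : '.' ∈ cs) :
    ∃ p t, cs = p ++ '.' :: t ∧ '.' ∉ p := by
  induction cs with
  | nil => cases h
  | cons c rest ih =>
    by_cases hc : c = '.'
    · exact ⟨[], rest, by simp [hc], by simp⟩
    · have : '.' ∈ rest := by
        rcases List.mem_cons.mp h with h1 | h1
        · exact absurd h1.symm hc
        · exact h1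
      obtain ⟨p, t, rfl, hp⟩ := ih this
      exact ⟨c :: p, t, rfl, by simp [hp, Ne.symm hc]⟩

theorem pv_nodot_forall {p : List Char} (hp : '.' ∉ p) : ∀ x ∈ p, ¬ (x == '.') = true :=
  fun _x hx h => hp ((eq_of_beq h) ▸ hx)

theorem pv_splitOn_first {p t : List Char} (hp : '.' ∉ p) :
    (p ++ '.' :: t).splitOn '.' = p :: t.splitOn '.' := by
  simpa [List.splitOn] using
    List.splitOnP_first (fun x => x == '.') p (pv_nodot_forall hp) '.' (by simp) t

theorem pv_splitOn_no_dot {t : List Char} (h : '.' ∉ t) : t.splitOn '.' = [t] := by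
  simpa [List.splitOn] using List.splitOnP_eq_single (fun x => x == '.') t (pv_nodot_forall h)




theorem pv_loopA_no_dot (cs s : List Char) (h : '.' ∉ cs) :
    ∀ l, pvLoopA cs s l = cs := by
  intro l
  induction l with
  | nil => rfl
  | cons pkg rest ih =>
    have hsw : ¬ PySem.Chars.startswith cs ("src.".toList ++ pkg ++ ['.']) = true := by
      rw [PySem.Chars.startswith_iff]
      intro hpre
      exact h (hpre.subset (by simp))
    have hne : cs ≠ "src.".toList ++ pkg := by
      rintro rfl
      exact h (List.mem_append_left _ (by decide))
    rw [pvLoopA, if_neg hsw, if_neg hne, ih]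

theorem pv_loopA_not_src (p t s : List Char) (hp : '.' ∉ p) (hps : p ≠ "src".toList) :
    ∀ l, pvLoopA (p ++ '.' :: t) s l = p ++ '.' :: t := by
  intro l
  induction l with
  | nil => rfl
  | cons pkg rest ih =>
    have hsw : ¬ PySem.Chars.startswith (p ++ '.' :: t) ("src.".toList ++ pkg ++ ['.']) = true := by
      rw [PySem.Chars.startswith_iff]
      intro hpre
      have h0 : ("src".toList ++ '.' :: (pkg ++ ['.'])) <+: (p ++ '.' :: t) := hpre
      exact hps ((pv_dot_prefix hp (by decide) h0).1.symm)
    have hne : p ++ '.' :: t ≠ "src.".toList ++ pkg := by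
      intro h
      have h' : p ++ '.' :: t = "src".toList ++ '.' :: pkg := h
      exact hps (pv_first_dot_unique hp (by decide) h').1
    rw [pvLoopA, if_neg hsw, if_neg hne, ih]

theorem pv_loopA_src_nodot (t s : List Char) (hdt : '.' ∉ t) :
    ∀ l, (∀ pkg ∈ l, '.' ∉ pkg) →
      pvLoopA ("src".toList ++ '.' :: t) s l =
        if t ∈ l then "src.".toList ++ t ++ s else "src".toList ++ '.' :: t := by
  intro l
  induction l with
  | nil => intro _; rfl
  | cons pkg rest ih =>
    intro hl
    have hsw : ¬ PySem.Chars.startswith ("src".toList ++ '.' :: t) ("src.".toList ++ pkg ++ ['.']) = true := by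
      rw [PySem.Chars.startswith_iff]
      intro hpre
      have h0 : ("src".toList ++ '.' :: (pkg ++ ['.'])) <+: ("src".toList ++ '.' :: t) := hpre
      exact hdt ((pv_dot_prefix (h := h0) (by decide) (by decide)).2.subset (List.mem_append_right _ (by decide)))
    by_cases heq : t = pkg
    · subst heq
      have hcs : ("src".toList ++ '.' :: t) = "src.".toList ++ t := rfl
      rw [pvLoopA, if_neg hsw, if_pos hcs, if_pos List.mem_cons_self]
    · have hne : ("src".toList ++ '.' :: t) ≠ "src.".toList ++ pkg := by
        intro h
        have h' : "src".toList ++ '.' :: t = "src".toList ++ '.' :: pkg := h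
        exact heq (by simpa using h')
      rw [pvLoopA, if_neg hsw, if_neg hne, ih (fun x hx => hl x (List.mem_cons_of_mem _ hx))]
      simp [heq]

theorem pv_loopA_src_dot (q u s : List Char) (hq : '.' ∉ q) :
    ∀ l, (∀ pkg ∈ l, '.' ∉ pkg) →
      pvLoopA ("src".toList ++ '.' :: (q ++ '.' :: u)) s l =
        if q ∈ l then "src.".toList ++ q ++ s ++ ['.'] ++ u
        else "src".toList ++ '.' :: (q ++ '.' :: u) := by
  intro l
  induction l with
  | nil => intro _; rfl
  | cons pkg rest ih =>
    intro hl
    have hpkg : '.' ∉ pkg := hl pkg List.mem_cons_self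
    by_cases heq : q = pkg
    · subst heq
      have hsw : PySem.Chars.startswith ("src".toList ++ '.' :: (q ++ '.' :: u)) ("src.".toList ++ q ++ ['.']) = true := by
        rw [PySem.Chars.startswith_iff]
        exact ⟨u, by simp⟩
      have hcs : ("src".toList ++ '.' :: (q ++ '.' :: u)) = ("src.".toList ++ q ++ ['.']) ++ u := by
        simp
      rw [pvLoopA, if_pos hsw, if_pos List.mem_cons_self, hcs, List.drop_left]
    · have hsw : ¬ PySem.Chars.startswith ("src".toList ++ '.' :: (q ++ '.' :: u)) ("src.".toList ++ pkg ++ ['.']) = true := by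
        rw [PySem.Chars.startswith_iff]
        intro hpre
        have h0 : ("src".toList ++ '.' :: (pkg ++ '.' :: ([] : List Char))) <+: ("src".toList ++ '.' :: (q ++ '.' :: u)) := hpre
        have h1 : (pkg ++ '.' :: ([] : List Char)) <+: (q ++ '.' :: u) :=
          (pv_dot_prefix (h := h0) (by decide) (by decide)).2
        exact heq ((pv_dot_prefix hq hpkg h1).1.symm)
      have hne : ("src".toList ++ '.' :: (q ++ '.' :: u)) ≠ "src.".toList ++ pkg := by
        intro h
        have h' : "src".toList ++ '.' :: (q ++ '.' :: u) = "src".toList ++ '.' :: pkg := h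
        have h2 : q ++ '.' :: u = pkg := by simpa using h'
        exact hpkg (h2 ▸ List.mem_append_right _ List.mem_cons_self)
      rw [pvLoopA, if_neg hsw, if_neg hne, ih (fun x hx => hl x (List.mem_cons_of_mem _ hx))]
      simp [heq]





theorem pv_join_split (a b u : List Char) :
    PySem.Chars.join ['.'] (a :: b :: u.splitOn '.') = a ++ '.' :: (b ++ '.' :: u) := by
  obtain ⟨v, vs, hv⟩ := List.exists_cons_of_ne_nil (List.splitOnP_ne_nil (fun x => x == '.') u)
  have hu : ['.'].intercalate (u.splitOn '.') = u := List.intercalate_splitOn u '.'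
  rw [show u.splitOn '.' = List.splitOnP (fun x => x == '.') u from rfl] at hu ⊢
  rw [hv] at hu ⊢
  rw [PySem.Chars.join_cons_cons, PySem.Chars.join_cons_cons]
  rw [show PySem.Chars.join ['.'] (v :: vs) = ['.'].intercalate (v :: vs) from rfl, hu]
  simp

theorem pv_join_pair (a b : List Char) : PySem.Chars.join ['.'] [a, b] = a ++ '.' :: b := by
  rw [PySem.Chars.join_cons_cons, PySem.Chars.join_singleton]
  simp

theorem pv_set_eq : pvPkgSet = pvPackages := by decide

theorem pv_core_eq (cs s : List Char) : pvCoreA cs s = pvCoreB cs s := by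
  have hl : ∀ pkg ∈ pvPackages, '.' ∉ pkg := by decide
  by_cases hdot : '.' ∈ cs
  · obtain ⟨p, t, rfl, hp⟩ := pv_exists_first_dot hdot
    by_cases hps : p = "src".toList
    · subst hps
      by_cases hdt : '.' ∈ t
      · obtain ⟨q, u, rfl, hq⟩ := pv_exists_first_dot hdt
        have hsplit : ("src".toList ++ '.' :: (q ++ '.' :: u)).splitOn '.'
            = "src".toList :: q :: u.splitOn '.' := by
          rw [pv_splitOn_first (by decide), pv_splitOn_first hq]
        rw [pvCoreB, hsplit, pvDispatchB, if_pos rfl]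
        by_cases hqi : q = "index".toList
        · subst hqi
          have hsw : PySem.Chars.startswith ("src".toList ++ '.' :: ("index".toList ++ '.' :: u))
              "src.index.".toList = true := by
            rw [PySem.Chars.startswith_iff]
            exact ⟨u, rfl⟩
          have hdrop : ("src".toList ++ '.' :: ("index".toList ++ '.' :: u)).drop
              ("src.index.".toList.length) = u := by
            rw [show ("src".toList ++ '.' :: ("index".toList ++ '.' :: u))
                = "src.index.".toList ++ u from rfl, List.drop_left]
          rw [pvCoreA, if_pos hsw, hdrop, if_pos rfl, pv_join_split]
          rw [show ("src.entry".toList : List Char) = "src".toList ++ '.' :: "entry".toList from rfl]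
          simp
        · have hsw : ¬ PySem.Chars.startswith ("src".toList ++ '.' :: (q ++ '.' :: u))
              "src.index.".toList = true := by
            rw [PySem.Chars.startswith_iff]
            intro hpre
            have h0 : ("src".toList ++ '.' :: ("index".toList ++ '.' :: ([] : List Char)))
                <+: ("src".toList ++ '.' :: (q ++ '.' :: u)) := hpre
            have h1 : ("index".toList ++ '.' :: ([] : List Char)) <+: (q ++ '.' :: u) :=
              (pv_dot_prefix (h := h0) (by decide) (by decide)).2
            exact hqi ((pv_dot_prefix hq (by decide) h1).1.symm)
          have hne : ("src".toList ++ '.' :: (q ++ '.' :: u)) ≠ "src.index".toList := by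
            intro h
            have h' : "src".toList ++ '.' :: (q ++ '.' :: u) = "src".toList ++ '.' :: "index".toList := h
            have h2 : q ++ '.' :: u = "index".toList := by simpa using h'
            have : '.' ∈ ("index".toList : List Char) := h2 ▸ List.mem_append_right _ List.mem_cons_self
            exact absurd this (by decide)
          rw [pvCoreA, if_neg hsw, if_neg hne, pv_loopA_src_dot q u s hq pvPackages hl,
            if_neg hqi, pv_set_eq, pv_join_split]
          by_cases hmem : q ∈ pvPackages
          · rw [if_pos hmem, if_pos hmem]
            rw [show ("src.".toList : List Char) = "src".toList ++ ['.'] from rfl]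
            simp
          · rw [if_neg hmem, if_neg hmem]
      · -- '.' ∉ t
        have hsplit : ("src".toList ++ '.' :: t).splitOn '.' = ["src".toList, t] := by
          rw [pv_splitOn_first (by decide), pv_splitOn_no_dot hdt]
        rw [pvCoreB, hsplit, pvDispatchB, if_pos rfl]
        have hsw : ¬ PySem.Chars.startswith ("src".toList ++ '.' :: t) "src.index.".toList = true := by
          rw [PySem.Chars.startswith_iff]
          intro hpre
          have h0 : ("src".toList ++ '.' :: ("index".toList ++ '.' :: ([] : List Char)))
              <+: ("src".toList ++ '.' :: t) := hpre
          have h1 : ("index".toList ++ '.' :: ([] : List Char)) <+: t :=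
            (pv_dot_prefix (h := h0) (by decide) (by decide)).2
          exact hdt (h1.subset (List.mem_append_right _ List.mem_cons_self))
        by_cases hti : t = "index".toList
        · subst hti
          rw [pvCoreA, if_neg hsw,
            if_pos (show ("src".toList ++ '.' :: "index".toList : List Char) = "src.index".toList from rfl)]
          rw [show ("src.entry".toList : List Char) = "src".toList ++ '.' :: "entry".toList from rfl]
          simp [pv_join_pair]
        · have hne : ("src".toList ++ '.' :: t) ≠ "src.index".toList := by
            intro h
            have h' : "src".toList ++ '.' :: t = "src".toList ++ '.' :: "index".toList := h
            exact hti (by simpa using h')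
          rw [pvCoreA, if_neg hsw, if_neg hne, pv_loopA_src_nodot t s hdt pvPackages hl,
            if_neg hti, pv_set_eq, pv_join_pair]
          by_cases hmem : t ∈ pvPackages
          · rw [if_pos hmem, if_pos hmem]
            rw [show ("src.".toList : List Char) = "src".toList ++ ['.'] from rfl]
            simp
          · rw [if_neg hmem, if_neg hmem]
    · -- first segment is not "src"
      obtain ⟨t1, ts, hts⟩ := List.exists_cons_of_ne_nil (List.splitOnP_ne_nil (fun x => x == '.') t)
      have hsplit : (p ++ '.' :: t).splitOn '.' = p :: t1 :: ts := by
        rw [pv_splitOn_first hp, show t.splitOn '.' = List.splitOnP (fun x => x == '.') t from rfl, hts]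
      rw [pvCoreB, hsplit, pvDispatchB, if_neg hps]
      have hsw : ¬ PySem.Chars.startswith (p ++ '.' :: t) "src.index.".toList = true := by
        rw [PySem.Chars.startswith_iff]
        intro hpre
        have h0 : ("src".toList ++ '.' :: ("index.".toList)) <+: (p ++ '.' :: t) := hpre
        exact hps ((pv_dot_prefix hp (by decide) h0).1.symm)
      have hne : (p ++ '.' :: t) ≠ "src.index".toList := by
        intro h
        have h' : p ++ '.' :: t = "src".toList ++ '.' :: "index".toList := h
        exact hps (pv_first_dot_unique hp (by decide) h').1
      rw [pvCoreA, if_neg hsw, if_neg hne, pv_loopA_not_src p t s hp hps pvPackages]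
  · -- no dot at all
    have hsplit : cs.splitOn '.' = [cs] := pv_splitOn_no_dot hdot
    rw [pvCoreB, hsplit, pvDispatchB]
    have hsw : ¬ PySem.Chars.startswith cs "src.index.".toList = true := by
      rw [PySem.Chars.startswith_iff]
      intro hpre
      exact hdot (hpre.subset (by decide))
    have hne : cs ≠ "src.index".toList := by
      rintro rfl
      exact hdot (by decide)
    rw [pvCoreA, if_neg hsw, if_neg hne, pv_loopA_no_dot cs s hdot pvPackages]
    intro first second rest h
    simp at h

-- ===== VERDICT (by name: the statement is the Claim_ definition above) =====
theorem rewrite_js_name_spec : Claim_equal_rewrite_js_name := by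
  intro name i _
  unfold Spec_rewrite_js_name rewrite_js_name rewrite_js_name_alt
  rw [pv_core_eq]
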